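-- pv_equiv track=rewrite | github.com/TejaSriRam111/CiCd-Ai-Agent | generator/workflow_writer.py | strip_non_yaml_content
-- ===== SOURCE A (Python) =====
-- def strip_non_yaml_content(yaml_content: str) -> str:
--     """
--     Strip markdown, explanations, and anything before the YAML starts.
--     """
--
--     lines = yaml_content.splitlines()
--     cleaned_lines = []
--     yaml_started = False
--
--     for line in lines:
--         if line.strip().startswith("```"):
--             continue
--
--         if not yaml_started:
--             if line.strip().startswith("name:"):
--                 yaml_started = True
--                 cleaned_lines.append(line)
--         else:
--             cleaned_lines.append(line)
--
--     return "\n".join(cleaned_lines)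
-- ===== SOURCE B (Python) =====
-- def strip_non_yaml_content(yaml_content: str) -> str:
--     lines = yaml_content.splitlines()
--     idx = next((i for i, l in enumerate(lines) if l.strip().startswith("name:")), None)
--     if idx is None:
--         return ""
--     return "\n".join(l for l in lines[idx:] if not l.strip().startswith("```"))
-- ===== Notes on version B (the rewrite author's own statement) =====
-- stated objective: simpler
-- what changed: Replaces the flag-based state machine with a locate-then-transform structure: find the index of the first line whose stripped form starts with 'name:' (return '' if none), then filter code-fence lines out of the tail and join.
import Mathlib
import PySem

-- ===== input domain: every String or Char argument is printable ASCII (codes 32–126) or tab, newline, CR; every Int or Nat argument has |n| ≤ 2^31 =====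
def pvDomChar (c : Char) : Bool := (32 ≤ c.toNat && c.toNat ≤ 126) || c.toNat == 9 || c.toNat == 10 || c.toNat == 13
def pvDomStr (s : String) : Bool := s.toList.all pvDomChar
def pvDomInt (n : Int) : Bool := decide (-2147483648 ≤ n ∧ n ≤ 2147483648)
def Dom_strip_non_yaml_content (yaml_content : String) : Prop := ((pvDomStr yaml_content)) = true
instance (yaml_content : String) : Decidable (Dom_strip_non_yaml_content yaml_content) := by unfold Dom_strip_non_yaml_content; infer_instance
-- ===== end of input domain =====

-- B replaces A's flag-based state machine by locate-the-'name:'-boundary then filter-and-join of the tail (objective: simpler).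

-- ===== PORT A =====
-- the two line tests A performs (shared vocabulary of both ports)
def pvFence (l : String) : Bool := PySem.Str.startswith (PySem.Str.strip l) "```"
def pvName (l : String) : Bool := PySem.Str.startswith (PySem.Str.strip l) "name:"

-- one step of A's loop; state = (cleaned_lines, yaml_started)
def pvStepA (acc : List String × Bool) (line : String) : List String × Bool :=
  if pvFence line then acc
  else if !acc.2 then
    if pvName line then (acc.1 ++ [line], true)
    else acc
  else (acc.1 ++ [line], acc.2)

def strip_non_yaml_content (yaml_content : String) : String :=
  let lines := PySem.Str.splitlines yaml_content
  let st := lines.foldl pvStepA ([], false)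
  PySem.Str.join "\n" st.1

-- ===== PORT B =====
def strip_non_yaml_content_alt (yaml_content : String) : String :=
  let lines := PySem.Str.splitlines yaml_content
  match lines.findIdx? (fun l => pvName l) with
  | none => ""
  | some i => PySem.Str.join "\n" ((lines.drop i).filter (fun l => !pvFence l))

-- ===== PRECONDITION & SPEC =====
def Spec_strip_non_yaml_content (yaml_content : String) (out : String) : Prop := out = strip_non_yaml_content_alt yaml_content
instance (yaml_content : String) (out : String) : Decidable (Spec_strip_non_yaml_content yaml_content out) := by unfold Spec_strip_non_yaml_content; infer_instance

-- ===== CLAIM (what is proved, stated in full; the proofs are below) =====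
def Claim_equal_strip_non_yaml_content : Prop := ∀ (yaml_content : String), Dom_strip_non_yaml_content yaml_content → Spec_strip_non_yaml_content yaml_content (strip_non_yaml_content yaml_content)

-- ===== LEMMAS AND PROOFS =====

-- a line cannot strip-start with both "name:" and "```"
lemma pv_name_not_fence (l : String) (h : pvName l = true) : pvFence l = false := by
  by_contra hf
  rw [Bool.not_eq_false] at hf
  unfold pvName at h
  unfold pvFence at hf
  rw [PySem.Str.startswith_eq, PySem.Chars.startswith_iff] at h hf
  rcases h with ⟨t1, h1⟩
  rcases hf with ⟨t2, h2⟩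
  rw [← h1] at h2
  have e1 : "```".toList = ['`', '`', '`'] := rfl
  have e2 : "name:".toList = ['n', 'a', 'm', 'e', ':'] := rfl
  rw [e1, e2] at h2
  simp at h2

-- once started, the loop appends every non-fence line
lemma pv_foldl_started (ls : List String) (acc : List String) :
    ls.foldl pvStepA (acc, true) = (acc ++ ls.filter (fun l => !pvFence l), true) := by
  induction ls generalizing acc with
  | nil => simp
  | cons l ls ih =>
    simp only [List.foldl_cons, List.filter_cons, pvStepA]
    by_cases hf : pvFence l = true
    · simp [hf, ih]
    · rw [Bool.not_eq_true] at hf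
      simp [hf, ih]

-- the not-started loop result, characterised by the first 'name:' index
lemma pv_foldl_main (ls : List String) :
    (ls.foldl pvStepA ([], false)).1 =
      match ls.findIdx? (fun l => pvName l) with
      | none => []
      | some i => (ls.drop i).filter (fun l => !pvFence l) := by
  induction ls with
  | nil => simp
  | cons l ls ih =>
    by_cases hn : pvName l = true
    · have hf := pv_name_not_fence l hn
      simp only [List.foldl_cons, pvStepA, hf, hn, Bool.not_false, Bool.false_eq_true,
        if_false, if_true, List.findIdx?_cons]
      rw [pv_foldl_started]
      simp [hf]
    · rw [Bool.not_eq_true] at hn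
      simp only [List.foldl_cons, pvStepA, hn, List.findIdx?_cons]
      by_cases hf : pvFence l = true
      · simp only [hf, if_true]
        rw [ih]
        cases h : ls.findIdx? (fun l => pvName l) with
        | none => simp
        | some j => simp
      · rw [Bool.not_eq_true] at hf
        simp only [hf, Bool.false_eq_true, Bool.not_false, if_false, if_true]
        rw [ih]
        cases h : ls.findIdx? (fun l => pvName l) with
        | none => simp
        | some j => simp

-- ===== VERDICT (by name: the statement is the Claim_ definition above) =====
theorem strip_non_yaml_content_spec : Claim_equal_strip_non_yaml_content := by
  intro s _
  unfold Spec_strip_non_yaml_content strip_non_yaml_content strip_non_yaml_content_alt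
  simp only
  rw [pv_foldl_main]
  cases h : (PySem.Str.splitlines s).findIdx? (fun l => pvName l) with
  | none => simp [PySem.Str.join, PySem.Chars.join, List.intercalate]
  | some i => simp
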